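-- pv_equiv track=rewrite | github.com/corbridge/GUI_Horarios | src/subjects.py | order_classes_by_day
-- ===== SOURCE A (Python) =====
-- def order_classes_by_day(list_dict):
--     list_135 = []
--     list_2 = []
--     list_4 = []
--
--     for dict in list_dict:
--         if '135' in dict['Day']:
--             list_135.append(dict)
--         elif '2' in dict['Day']:
--             list_2.append(dict)
--         elif '4' in dict['Day']:
--             list_4.append(dict)
--     new_order = list_135 + list_2 + list_4
--     return new_order
-- ===== SOURCE B (Python) =====
-- def order_classes_by_day(list_dict):
--     def rank(d):
--         day = d['Day']
--         if '135' in day: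
--             return 0
--         if '2' in day:
--             return 1
--         if '4' in day:
--             return 2
--         return 3
--     return sorted([d for d in list_dict if rank(d) < 3], key=rank)
-- ===== Notes on version B (the rewrite author's own statement) =====
-- stated objective: alternative
-- what changed: Replaces the three-bucket accumulation pass plus concatenation with a rank function (0/1/2 per the elif chain, 3 = unmatched), filtering out unmatched dicts and stably sorting the rest by rank.
import Mathlib
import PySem

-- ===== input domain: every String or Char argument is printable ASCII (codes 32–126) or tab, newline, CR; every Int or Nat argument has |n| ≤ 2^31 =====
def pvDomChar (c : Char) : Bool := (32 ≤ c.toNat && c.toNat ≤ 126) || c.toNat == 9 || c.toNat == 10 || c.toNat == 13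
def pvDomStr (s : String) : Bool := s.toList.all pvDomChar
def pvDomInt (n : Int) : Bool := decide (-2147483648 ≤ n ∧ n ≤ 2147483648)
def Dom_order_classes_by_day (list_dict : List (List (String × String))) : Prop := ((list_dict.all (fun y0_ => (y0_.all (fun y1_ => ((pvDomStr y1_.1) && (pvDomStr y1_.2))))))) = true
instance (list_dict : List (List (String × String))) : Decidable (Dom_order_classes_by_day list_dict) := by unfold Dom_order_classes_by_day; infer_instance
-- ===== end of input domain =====

-- B replaces A's three-bucket accumulation + concatenation by a rank function, a filter and a
-- stable sort by rank (objective: alternative decomposition, same result order by sort stability).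
-- ===== PORT A =====
-- the body of A's for-loop (one bucketing step; dict['Day'] is total only under Pre_)
def pvStepA (acc : List (List (String × String)) × List (List (String × String)) × List (List (String × String)))
    (d : List (String × String)) :
    List (List (String × String)) × List (List (String × String)) × List (List (String × String)) :=
  if PySem.Str.isIn "135" (PySem.Dict.getD (PySem.Dict.mk d) "Day" "") then (acc.1 ++ [d], acc.2.1, acc.2.2)
  else if PySem.Str.isIn "2" (PySem.Dict.getD (PySem.Dict.mk d) "Day" "") then (acc.1, acc.2.1 ++ [d], acc.2.2)
  else if PySem.Str.isIn "4" (PySem.Dict.getD (PySem.Dict.mk d) "Day" "") then (acc.1, acc.2.1, acc.2.2 ++ [d])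
  else acc

def order_classes_by_day (list_dict : List (List (String × String))) : List (List (String × String)) :=
  let s := list_dict.foldl pvStepA ([], [], [])
  s.1 ++ s.2.1 ++ s.2.2

-- ===== PORT B =====
-- B's rank helper: 0/1/2 per the elif chain on d['Day'], 3 = unmatched
def pvRank (d : List (String × String)) : Nat :=
  if PySem.Str.isIn "135" (PySem.Dict.getD (PySem.Dict.mk d) "Day" "") then 0
  else if PySem.Str.isIn "2" (PySem.Dict.getD (PySem.Dict.mk d) "Day" "") then 1
  else if PySem.Str.isIn "4" (PySem.Dict.getD (PySem.Dict.mk d) "Day" "") then 2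
  else 3

def order_classes_by_day_alt (list_dict : List (List (String × String))) : List (List (String × String)) :=
  PySem.List.sorted (list_dict.filter (fun d => decide (pvRank d < 3))) pvRank false

-- ===== PRECONDITION & SPEC =====
-- Pre_ excludes exactly the inputs where some dict lacks the 'Day' key: there Python A raises
-- KeyError (and B raises too).
def Pre_order_classes_by_day (list_dict : List (List (String × String))) : Prop :=
  ∀ d ∈ list_dict, PySem.Dict.contains (PySem.Dict.mk d) "Day" = true
instance (list_dict : List (List (String × String))) : Decidable (Pre_order_classes_by_day list_dict) := by unfold Pre_order_classes_by_day; infer_instance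
def pvWitness_order_classes_by_day : (List (List (String × String))) := [[("Day", "135")], [("Day", "24")]]

def Spec_order_classes_by_day (list_dict : List (List (String × String))) (out : List (List (String × String))) : Prop := out = order_classes_by_day_alt list_dict
instance (list_dict : List (List (String × String))) (out : List (List (String × String))) : Decidable (Spec_order_classes_by_day list_dict out) := by unfold Spec_order_classes_by_day; infer_instance

-- ===== CLAIM (what is proved, stated in full; the proofs are below) =====
def Claim_equal_order_classes_by_day : Prop := ∀ (list_dict : List (List (String × String))), Dom_order_classes_by_day list_dict → Pre_order_classes_by_day list_dict → Spec_order_classes_by_day list_dict (order_classes_by_day list_dict)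

-- ===== LEMMAS AND PROOFS =====

-- concatenation of the three rank-classes of L, in order of first appearance
def pvF (L : List (List (String × String))) : List (List (String × String)) :=
  L.filter (fun d => decide (pvRank d = 0)) ++ L.filter (fun d => decide (pvRank d = 1))
    ++ L.filter (fun d => decide (pvRank d = 2))

lemma pvRank_cases (d : List (String × String)) :
    pvRank d = 0 ∨ pvRank d = 1 ∨ pvRank d = 2 ∨ pvRank d = 3 := by
  unfold pvRank; split_ifs <;> simp

lemma pv_insertBy_split (b : List (String × String) → List (String × String) → Bool)
    (x : List (String × String)) (p q : List (List (String × String)))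
    (hp : ∀ a ∈ p, b x a = false) (hq : ∀ a ∈ q, b x a = true) :
    PySem.List.insertBy b x (p ++ q) = p ++ x :: q := by
  induction p with
  | nil =>
    cases q with
    | nil => rfl
    | cons a t => simp [PySem.List.insertBy, hq a (by simp)]
  | cons a t ih =>
    have ha : b x a = false := hp a (by simp)
    simp only [List.cons_append, PySem.List.insertBy, ha, Bool.false_eq_true, if_false]
    have := ih (fun y hy => hp y (by simp [hy]))
    cases h : t ++ q with
    | nil => simp_all
    | cons z zs => simp_all

-- the insertion step of B's stable sort, on a state of pvF shape
lemma pv_ins_step (p : List (List (String × String))) (d : List (String × String)) :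
    PySem.List.insertBy (fun a b => decide (pvRank a < pvRank b)) d (pvF p) =
      (if pvRank d = 0 then
        (p.filter (fun d => decide (pvRank d = 0)) ++ d :: (p.filter (fun d => decide (pvRank d = 1)) ++ p.filter (fun d => decide (pvRank d = 2))))
      else if pvRank d = 1 then
        ((p.filter (fun d => decide (pvRank d = 0)) ++ p.filter (fun d => decide (pvRank d = 1))) ++ d :: p.filter (fun d => decide (pvRank d = 2)))
      else
        pvF p ++ [d]) := by
  have m0 : ∀ a ∈ p.filter (fun d => decide (pvRank d = 0)), pvRank a = 0 := by
    intro a ha; simpa using (List.mem_filter.mp ha).2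
  have m1 : ∀ a ∈ p.filter (fun d => decide (pvRank d = 1)), pvRank a = 1 := by
    intro a ha; simpa using (List.mem_filter.mp ha).2
  have m2 : ∀ a ∈ p.filter (fun d => decide (pvRank d = 2)), pvRank a = 2 := by
    intro a ha; simpa using (List.mem_filter.mp ha).2
  split_ifs with h0 h1
  · have := pv_insertBy_split (fun a b => decide (pvRank a < pvRank b)) d
      (p.filter (fun d => decide (pvRank d = 0)))
      (p.filter (fun d => decide (pvRank d = 1)) ++ p.filter (fun d => decide (pvRank d = 2)))
      (by intro a ha; have := m0 a ha; simp only [decide_eq_false_iff_not]; omega)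
      (by intro a ha
          rcases List.mem_append.mp ha with ha | ha
          · have := m1 a ha; simp only [decide_eq_true_eq]; omega
          · have := m2 a ha; simp only [decide_eq_true_eq]; omega)
    simpa [pvF, List.append_assoc] using this
  · have := pv_insertBy_split (fun a b => decide (pvRank a < pvRank b)) d
      ((p.filter (fun d => decide (pvRank d = 0)) ++ p.filter (fun d => decide (pvRank d = 1))))
      (p.filter (fun d => decide (pvRank d = 2)))
      (by intro a ha
          rcases List.mem_append.mp ha with ha | ha
          · have := m0 a ha; simp only [decide_eq_false_iff_not]; omega
          · have := m1 a ha; simp only [decide_eq_false_iff_not]; omega)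
      (by intro a ha; have := m2 a ha; simp only [decide_eq_true_eq]; omega)
    simpa [pvF, List.append_assoc] using this
  · have hge : 2 ≤ pvRank d := by rcases pvRank_cases d with h | h | h | h <;> omega
    have := pv_insertBy_split (fun a b => decide (pvRank a < pvRank b)) d
      (pvF p) []
      (by intro a ha
          rcases List.mem_append.mp ha with ha | ha
          · rcases List.mem_append.mp ha with ha | ha
            · have := m0 a ha; simp only [decide_eq_false_iff_not]; omega
            · have := m1 a ha; simp only [decide_eq_false_iff_not]; omega
          · have := m2 a ha; simp only [decide_eq_false_iff_not]; omega)
      (by intro a ha; simp at ha)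
    simpa using this

lemma pvF_append_singleton (p : List (List (String × String))) (d : List (String × String)) :
    pvF (p ++ [d]) =
      (if pvRank d = 0 then
        (p.filter (fun d => decide (pvRank d = 0)) ++ d :: (p.filter (fun d => decide (pvRank d = 1)) ++ p.filter (fun d => decide (pvRank d = 2))))
      else if pvRank d = 1 then
        ((p.filter (fun d => decide (pvRank d = 0)) ++ p.filter (fun d => decide (pvRank d = 1))) ++ d :: p.filter (fun d => decide (pvRank d = 2)))
      else if pvRank d = 2 then pvF p ++ [d]
      else pvF p) := by
  simp only [pvF, List.filter_append, List.filter_cons, List.filter_nil]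
  split_ifs with h0 h1 h2 <;> simp_all [List.append_assoc]

-- loop invariant for B's insertion-sort fold
lemma pv_sortFold : ∀ (L p : List (List (String × String))),
    (L.filter (fun d => decide (pvRank d < 3))).foldl
      (fun acc x => PySem.List.insertBy (fun a b => decide (pvRank a < pvRank b)) x acc) (pvF p)
    = pvF (p ++ L) := by
  intro L
  induction L with
  | nil => simp
  | cons d t ih =>
    intro p
    by_cases h : pvRank d < 3
    · have step : PySem.List.insertBy (fun a b => decide (pvRank a < pvRank b)) d (pvF p) = pvF (p ++ [d]) := by
        rw [pv_ins_step, pvF_append_singleton]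
        split_ifs with h0 h1 h2 <;> first | rfl | omega
      simp only [List.filter_cons, h, decide_true, if_true, List.foldl_cons, step]
      have := ih (p ++ [d])
      simpa [List.append_assoc] using this
    · have h3 : pvRank d = 3 := by rcases pvRank_cases d with h' | h' | h' | h' <;> omega
      have hF : pvF (p ++ [d]) = pvF p := by
        rw [pvF_append_singleton]; simp [h3]
      simp only [List.filter_cons, h, decide_false]
      have := ih (p ++ [d])
      rw [hF] at this
      simpa [List.append_assoc] using this

-- B computes pvF
lemma pv_alt_eq (L : List (List (String × String))) : order_classes_by_day_alt L = pvF L := by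
  unfold order_classes_by_day_alt
  rw [PySem.List.sorted_eq_foldl_insertBy]
  have := pv_sortFold L []
  simpa [pvF] using this

-- A's loop body, expressed through B's rank
lemma pvStepA_eq (acc : List (List (String × String)) × List (List (String × String)) × List (List (String × String)))
    (d : List (String × String)) :
    pvStepA acc d =
      if pvRank d = 0 then (acc.1 ++ [d], acc.2.1, acc.2.2)
      else if pvRank d = 1 then (acc.1, acc.2.1 ++ [d], acc.2.2)
      else if pvRank d = 2 then (acc.1, acc.2.1, acc.2.2 ++ [d])
      else acc := by
  unfold pvStepA pvRank
  split_ifs <;> simp_all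

-- loop invariant for A's bucketing fold
lemma pv_A_fold : ∀ (L : List (List (String × String)))
    (l1 l2 l3 : List (List (String × String))),
    L.foldl pvStepA (l1, l2, l3)
    = (l1 ++ L.filter (fun d => decide (pvRank d = 0)),
       l2 ++ L.filter (fun d => decide (pvRank d = 1)),
       l3 ++ L.filter (fun d => decide (pvRank d = 2))) := by
  intro L
  induction L with
  | nil => simp
  | cons d t ih =>
    intro l1 l2 l3
    simp only [List.foldl_cons, List.filter_cons, pvStepA_eq]
    rcases pvRank_cases d with hr | hr | hr | hr <;>
      simp [hr, ih, List.append_assoc]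

-- ===== VERDICT (by name: the statement is the Claim_ definition above) =====
theorem order_classes_by_day_spec : Claim_equal_order_classes_by_day := by
  intro L _ _
  unfold Spec_order_classes_by_day order_classes_by_day
  rw [pv_alt_eq, pv_A_fold]
  simp [pvF]
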